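-- pv_equiv track=rewrite | github.com/j5t3313/f1-superclipping-viz | harvest_map_lightmode.py | filter_short_runs
-- ===== SOURCE A (Python) =====
-- def filter_short_runs(states, min_length):
--     filtered = list(states)
--     i = 0
--     while i < len(filtered):
--         j = i
--         while j < len(filtered) and filtered[j] == filtered[i]:
--             j += 1
--         if (j - i) < min_length and i > 0:
--             filtered[i:j] = [filtered[i - 1]] * (j - i)
--         i = j
--     return filtered
-- ===== SOURCE B (Python) =====
-- def filter_short_runs(states, min_length):
--     # Phase 1: collect runs of the original input as (value, length) pairs.
--     runs = []
--     for s in states: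
--         if runs and runs[-1][0] == s:
--             runs[-1] = (s, runs[-1][1] + 1)
--         else:
--             runs.append((s, 1))
--     if not runs:
--         return []
--     # Phase 2: emit, tracking the value last emitted (prev).
--     v0, n0 = runs[0]
--     out = [v0] * n0
--     prev = v0
--     for v, n in runs[1:]:
--         val = prev if n < min_length else v
--         out.extend([val] * n)
--         prev = val
--     return out
-- ===== Notes on version B (the rewrite author's own statement) =====
-- stated objective: simpler
-- what changed: A rewrites a copied list in place with a while/while scan and slice assignment; B first collects (value,length) runs from the untouched input, then emits a fresh output run by run, propagating the last emitted value into short runs.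
import Mathlib
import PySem

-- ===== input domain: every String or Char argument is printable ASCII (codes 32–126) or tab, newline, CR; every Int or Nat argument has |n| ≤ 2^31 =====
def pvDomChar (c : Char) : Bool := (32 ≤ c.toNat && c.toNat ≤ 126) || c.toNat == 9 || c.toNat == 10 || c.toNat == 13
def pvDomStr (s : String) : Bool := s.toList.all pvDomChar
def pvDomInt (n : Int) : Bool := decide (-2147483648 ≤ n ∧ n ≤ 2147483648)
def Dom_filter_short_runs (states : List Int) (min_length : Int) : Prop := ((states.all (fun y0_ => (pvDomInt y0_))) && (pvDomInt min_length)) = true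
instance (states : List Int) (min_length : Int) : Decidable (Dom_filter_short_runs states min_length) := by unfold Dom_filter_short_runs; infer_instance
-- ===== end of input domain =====

-- B replaces A's in-place slice rewriting of a copy by a two-phase run-list decomposition (objective: simpler); neither mutates the caller's list.

-- ===== PORT A =====
-- inner loop: 'j = i; while j < len(filtered) and filtered[j] == filtered[i]: j += 1'
def runEndA (filtered : List Int) (i j : Nat) : Nat :=
  if _h : j < filtered.length ∧ filtered.getD j 0 = filtered.getD i 0 then
    runEndA filtered i (j + 1)
  else j
termination_by filtered.length - j
decreasing_by
  exact Nat.sub_succ_lt_self filtered.length j _h.1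

-- bounds on the inner loop, needed for the outer loop's termination
theorem runEndA_le (f : List Int) (i : Nat) : ∀ j, j ≤ f.length → runEndA f i j ≤ f.length := by
  intro j
  induction j using runEndA.induct (filtered := f) (i := i) with
  | case1 j h ih =>
      intro _; rw [runEndA, dif_pos h]; exact ih h.1
  | case2 j h =>
      intro hj; rw [runEndA, dif_neg h]; exact hj

theorem runEndA_ge (f : List Int) (i : Nat) : ∀ j, j ≤ runEndA f i j := by
  intro j
  induction j using runEndA.induct (filtered := f) (i := i) with
  | case1 j h ih => rw [runEndA, dif_pos h]; exact Nat.le_of_succ_le ih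
  | case2 j h => rw [runEndA, dif_neg h]

theorem runEndA_gt (f : List Int) (i : Nat) (h : i < f.length) : i < runEndA f i i := by
  rw [runEndA, dif_pos ⟨h, rfl⟩]
  exact Nat.lt_of_lt_of_le (Nat.lt_succ_self i) (runEndA_ge f i (i + 1))

-- the rewritten list keeps its length (cited by loopA's decreasing_by)
theorem loopA_len_eq (f : List Int) (i : Nat) (hi : i ≤ f.length) (hij : i < runEndA f i i)
    (hj : runEndA f i i ≤ f.length) (x : Int) :
    (f.take i ++ List.replicate (runEndA f i i - i) x ++ f.drop (runEndA f i i)).length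
      = f.length := by
  rw [List.length_append, List.length_append, List.length_take, List.length_replicate,
    List.length_drop, Nat.min_eq_left hi, Nat.add_sub_cancel' (Nat.le_of_lt hij),
    Nat.add_sub_cancel' hj]

-- outer loop: 'while i < len(filtered): …; if (j-i) < min_length and i > 0: filtered[i:j] = [filtered[i-1]]*(j-i); i = j'
-- (j is the name Python gives to runEndA filtered i i)
def loopA (ml : Int) (filtered : List Int) (i : Nat) : List Int :=
  if h : i < filtered.length then
    if ((runEndA filtered i i : Int) - (i : Int)) < ml ∧ 0 < i then
      loopA ml (filtered.take i ++
                List.replicate (runEndA filtered i i - i) (filtered.getD (i - 1) 0) ++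
                filtered.drop (runEndA filtered i i)) (runEndA filtered i i)
    else
      loopA ml filtered (runEndA filtered i i)
  else filtered
termination_by filtered.length - i
decreasing_by
  · rw [loopA_len_eq filtered i (le_of_lt h) (runEndA_gt filtered i h)
      (runEndA_le filtered i i (le_of_lt h))]
    exact Nat.sub_lt_sub_left h (runEndA_gt filtered i h)
  · exact Nat.sub_lt_sub_left h (runEndA_gt filtered i h)

def filter_short_runs (states : List Int) (min_length : Int) : List Int :=
  loopA min_length states 0

-- ===== PORT B =====
-- phase 1 body: 'runs[-1] = (s, runs[-1][1] + 1)' / 'runs.append((s, 1))'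
def addRun (runs : List (Int × Nat)) (s : Int) : List (Int × Nat) :=
  match runs.getLast? with
  | some (v, n) => if v = s then runs.dropLast ++ [(s, n + 1)] else runs ++ [(s, 1)]
  | none => [(s, 1)]

def runsOf (states : List Int) : List (Int × Nat) := states.foldl addRun []

-- phase 2 body: 'val = prev if n < min_length else v; out.extend([val]*n); prev = val'
def emitFold (ml : Int) (acc : List Int × Int) (vn : Int × Nat) : List Int × Int :=
  let val := if (vn.2 : Int) < ml then acc.2 else vn.1
  (acc.1 ++ List.replicate vn.2 val, val)

def filter_short_runs_alt (states : List Int) (min_length : Int) : List Int :=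
  match runsOf states with
  | [] => []
  | (v0, n0) :: rest => (rest.foldl (emitFold min_length) (List.replicate n0 v0, v0)).1

-- ===== PRECONDITION & SPEC =====
def Spec_filter_short_runs (states : List Int) (min_length : Int) (out : List Int) : Prop := out = filter_short_runs_alt states min_length
instance (states : List Int) (min_length : Int) (out : List Int) : Decidable (Spec_filter_short_runs states min_length out) := by unfold Spec_filter_short_runs; infer_instance

-- ===== CLAIM (what is proved, stated in full; the proofs are below) =====
def Claim_equal_filter_short_runs : Prop := ∀ (states : List Int) (min_length : Int), Dom_filter_short_runs states min_length → Spec_filter_short_runs states min_length (filter_short_runs states min_length)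

-- ===== LEMMAS AND PROOFS =====

-- recursive reference emitter (semantic reading of B's second phase)
def emitR (ml : Int) (p : Int) : List (Int × Nat) → List Int
  | [] => []
  | (v, n) :: rs =>
      List.replicate n (if (n : Int) < ml then p else v) ++
        emitR ml (if (n : Int) < ml then p else v) rs

theorem emitFold_eq_emitR (ml : Int) : ∀ (rs : List (Int × Nat)) (acc : List Int) (p : Int),
    (rs.foldl (emitFold ml) (acc, p)).1 = acc ++ emitR ml p rs := by
  intro rs
  induction rs with
  | nil => intro acc p; simp [emitR]
  | cons vn rs ih =>
      intro acc p
      obtain ⟨v, n⟩ := vn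
      simp only [List.foldl_cons, emitFold, emitR]
      rw [ih]
      simp [List.append_assoc]

-- number of leading elements equal to v
def leadCount (v : Int) : List Int → Nat
  | [] => 0
  | x :: t => if x = v then leadCount v t + 1 else 0

theorem leadCount_decomp (v : Int) : ∀ l : List Int,
    l = List.replicate (leadCount v l) v ++ l.drop (leadCount v l) ∧
    (l.drop (leadCount v l)).head? ≠ some v := by
  intro l
  induction l with
  | nil => simp [leadCount]
  | cons x t ih =>
      by_cases hx : x = v
      · subst hx
        have hlc : leadCount x (x :: t) = leadCount x t + 1 := by simp [leadCount]
        rw [hlc]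
        refine ⟨?_, ?_⟩
        · rw [List.replicate_succ, List.drop_succ_cons, List.cons_append]
          exact congrArg _ ih.1
        · rw [List.drop_succ_cons]
          exact ih.2
      · simp [leadCount, hx]

-- runsOf on a leading run
theorem addRun_append (rs : List (Int × Nat)) (vn : Int × Nat) (s : Int) :
    addRun (rs ++ [vn]) s =
      if vn.1 = s then rs ++ [(s, vn.2 + 1)] else rs ++ [vn] ++ [(s, 1)] := by
  obtain ⟨v, n⟩ := vn
  simp [addRun, List.getLast?_append]

theorem foldl_addRun_replicate (n : Nat) : ∀ (v : Int) (rs : List (Int × Nat)) (c : Nat),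
    (List.replicate n v).foldl addRun (rs ++ [(v, c)]) = rs ++ [(v, c + n)] := by
  induction n with
  | zero => intro v rs c; simp
  | succ m ih =>
      intro v rs c
      rw [List.replicate_succ, List.foldl_cons, addRun_append, if_pos rfl, ih]
      congr 3; omega

theorem foldl_addRun_prefix : ∀ (l : List Int) (rs : List (Int × Nat)) (vn : Int × Nat),
    l.foldl addRun (rs ++ [vn]) = rs ++ l.foldl addRun [vn] := by
  intro l
  induction l with
  | nil => intro rs vn; simp
  | cons s t ih =>
      intro rs vn
      rw [List.foldl_cons, List.foldl_cons, addRun_append]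
      by_cases hv : vn.1 = s
      · rw [if_pos hv, ih rs (s, vn.2 + 1)]
        have h1 : addRun [vn] s = [(s, vn.2 + 1)] := by
          obtain ⟨v, n⟩ := vn
          simp_all [addRun]
        rw [h1]
      · rw [if_neg hv]
        have h2 : addRun [vn] s = [vn] ++ [(s, 1)] := by
          obtain ⟨v, n⟩ := vn
          simp_all [addRun]
        rw [h2, ih (rs ++ [vn]) (s, 1), ih [vn] (s, 1)]
        simp [List.append_assoc]

theorem runsOf_run (v : Int) (n : Nat) (hn : 0 < n) (tail : List Int)
    (ht : tail.head? ≠ some v) :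
    runsOf (List.replicate n v ++ tail) = (v, n) :: runsOf tail := by
  obtain ⟨m, rfl⟩ : ∃ m, n = m + 1 := ⟨n - 1, by omega⟩
  unfold runsOf
  rw [List.replicate_succ, List.cons_append, List.foldl_cons, List.foldl_append]
  have h0 : addRun [] v = [(v, 1)] := by simp [addRun]
  rw [h0]
  have h1 : (List.replicate m v).foldl addRun [(v, 1)] = [(v, 1 + m)] := by
    simpa using foldl_addRun_replicate m v [] 1
  rw [h1]
  cases tail with
  | nil => simp; omega
  | cons s t =>
      have hs : s ≠ v := by simpa using ht
      have h2 : addRun [(v, 1 + m)] s = [(v, 1 + m)] ++ [(s, 1)] := by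
        have hvs : ¬ v = s := fun h => hs h.symm
        simp [addRun, hvs]
      have h3 : addRun [] s = [(s, 1)] := by simp [addRun]
      rw [List.foldl_cons, h2, foldl_addRun_prefix t [(v, 1 + m)] (s, 1)]
      conv_rhs => rw [List.foldl_cons, h3]
      simp [Nat.add_comm]

-- getD helpers
theorem getD_append_l (a b : List Int) (k : Nat) (hk : k < a.length) :
    (a ++ b).getD k 0 = a.getD k 0 := by
  simp [List.getD, List.getElem?_append_left hk]

theorem getD_append_r (a b : List Int) (k : Nat) :
    (a ++ b).getD (a.length + k) 0 = b.getD k 0 := by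
  simp [List.getD, List.getElem?_append_right (Nat.le_add_right a.length k)]

theorem getD_replicate (v : Int) (n k : Nat) (hk : k < n) :
    (List.replicate n v).getD k 0 = v := by
  simp [List.getD, hk]

-- characterisation of the inner while loop
theorem runEndA_spec (f : List Int) (i e : Nat) (he : e ≤ f.length) :
    ∀ d j, e - j = d → j ≤ e →
    (∀ k, j ≤ k → k < e → f.getD k 0 = f.getD i 0) →
    (e = f.length ∨ f.getD e 0 ≠ f.getD i 0) →
    runEndA f i j = e := by
  intro d
  induction d with
  | zero =>
      intro j hd hj _ hend
      have hje : j = e := by omega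
      subst hje
      rw [runEndA, dif_neg]
      rintro ⟨h1, h2⟩
      rcases hend with h | h
      · omega
      · exact h h2
  | succ m ih =>
      intro j hd hj hall hend
      have hje : j < e := by omega
      rw [runEndA, dif_pos ⟨by omega, hall j le_rfl hje⟩]
      exact ih (j + 1) (by omega) (by omega)
        (fun k hk1 hk2 => hall k (by omega) hk2) hend

theorem getLast?_replicate_succ (p : Int) (m : Nat) :
    (List.replicate (m + 1) p).getLast? = some p := by
  rw [List.replicate_succ']
  simp

-- main lemma: A's loop on done ++ tail equals done ++ B's emission over the runs of tail,
-- where p is the last element already emitted (done's last element)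
theorem loopA_emitR (ml : Int) : ∀ (N : Nat) (tail : List Int), tail.length ≤ N →
    ∀ (done : List Int) (p : Int), done ≠ [] → done.getLast? = some p →
    loopA ml (done ++ tail) done.length = done ++ emitR ml p (runsOf tail) := by
  intro N
  induction N with
  | zero =>
      intro tail hlen done p hd hp
      have ht : tail = [] := by
        cases tail with
        | nil => rfl
        | cons a b => simp at hlen
      subst ht
      rw [loopA, dif_neg (by simp)]
      simp [runsOf, emitR]
  | succ N ih =>
      intro tail hlen done p hd hp
      cases htl : tail with
      | nil =>
          rw [loopA, dif_neg (by simp)]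
          simp [runsOf, emitR]
      | cons v t =>
          subst htl
          obtain ⟨hdec, hhd⟩ := leadCount_decomp v (v :: t)
          set n := leadCount v (v :: t) with hn_def
          set tl := (v :: t).drop n with htl_def
          have hn : 0 < n := by rw [hn_def]; simp [leadCount]
          have hipos : 0 < done.length := List.length_pos_iff.mpr hd
          rw [hdec]
          have hlen2 : n + tl.length ≤ N + 1 := by
            have h5 : n + tl.length = (v :: t).length := by
              conv_rhs => rw [hdec]
              simp only [List.length_append, List.length_replicate]
            omega
          -- getD facts
          have hvk : ∀ k, k < n →
              (done ++ (List.replicate n v ++ tl)).getD (done.length + k) 0 = v := by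
            intro k hk
            rw [getD_append_r, getD_append_l _ _ k (by simpa using hk), getD_replicate v n k hk]
          have hfi : (done ++ (List.replicate n v ++ tl)).getD done.length 0 = v := by
            simpa using hvk 0 hn
          have hflen : (done ++ (List.replicate n v ++ tl)).length
              = done.length + (n + tl.length) := by simp
          have hi : done.length < (done ++ (List.replicate n v ++ tl)).length := by
            rw [hflen]; omega
          have hall : ∀ k, done.length ≤ k → k < done.length + n →
              (done ++ (List.replicate n v ++ tl)).getD k 0
                = (done ++ (List.replicate n v ++ tl)).getD done.length 0 := by
            intro k h1 h2
            have hk := hvk (k - done.length) (by omega)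
            rw [show done.length + (k - done.length) = k from by omega] at hk
            rw [hk, hfi]
          have hend : done.length + n = (done ++ (List.replicate n v ++ tl)).length ∨
              (done ++ (List.replicate n v ++ tl)).getD (done.length + n) 0
                ≠ (done ++ (List.replicate n v ++ tl)).getD done.length 0 := by
            by_cases htl2 : tl = []
            · left; rw [hflen, htl2]; simp
            · right
              obtain ⟨s, t', hst⟩ := List.exists_cons_of_ne_nil htl2
              have hs : s ≠ v := by rw [hst] at hhd; simpa using hhd
              have h1 : (done ++ (List.replicate n v ++ tl)).getD (done.length + n) 0 = s := by
                rw [getD_append_r]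
                have h2 := getD_append_r (List.replicate n v) tl 0
                simp only [List.length_replicate, Nat.add_zero] at h2
                rw [h2, hst]; rfl
              rw [h1, hfi]
              exact hs
          have hj : runEndA (done ++ (List.replicate n v ++ tl)) done.length done.length
              = done.length + n :=
            runEndA_spec _ done.length (done.length + n) (by omega) n done.length
              (by omega) (by omega) hall hend
          -- unfold one outer iteration
          rw [loopA, dif_pos hi, hj]
          have htake : (done ++ (List.replicate n v ++ tl)).take done.length = done := by
            simp
          have hdrop : (done ++ (List.replicate n v ++ tl)).drop (done.length + n) = tl := by
            rw [← List.append_assoc]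
            have hlen3 : (done ++ List.replicate n v).length = done.length + n := by simp
            rw [← hlen3, List.drop_left]
          have hprev : (done ++ (List.replicate n v ++ tl)).getD (done.length - 1) 0 = p := by
            rw [getD_append_l _ _ _ (by omega)]
            have h4 := List.getLast?_eq_getElem? (l := done)
            rw [hp] at h4
            simp [List.getD, ← h4]
          have hrw := runsOf_run v n hn tl hhd
          have hrepl : ∀ q : Int, (List.replicate n q).getLast? = some q := by
            intro q
            obtain ⟨m, hm⟩ : ∃ m, n = m + 1 := ⟨n - 1, by omega⟩
            rw [hm]
            exact getLast?_replicate_succ q m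
          by_cases hshort : (n : Int) < ml
          · rw [if_pos ⟨by push_cast; omega, hipos⟩]
            rw [htake, hdrop, hprev, show done.length + n - done.length = n from by omega]
            have hlast : (done ++ List.replicate n p).getLast? = some p := by
              rw [List.getLast?_append, hrepl p]
              rfl
            have hcall := ih tl (by omega) (done ++ List.replicate n p) p (by simp [hd]) hlast
            have hlen4 : (done ++ List.replicate n p).length = done.length + n := by simp
            rw [hlen4] at hcall
            rw [hcall, hrw]
            simp [emitR, if_pos hshort, List.append_assoc]
          · rw [if_neg (by push_cast; omega)]
            have hlast : (done ++ List.replicate n v).getLast? = some v := by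
              rw [List.getLast?_append, hrepl v]
              rfl
            have hcall := ih tl (by omega) (done ++ List.replicate n v) v (by simp [hd]) hlast
            have hlen4 : (done ++ List.replicate n v).length = done.length + n := by simp
            rw [hlen4] at hcall
            rw [← List.append_assoc, hcall, hrw]
            simp [emitR, if_neg hshort, List.append_assoc]

-- ===== VERDICT (by name: the statement is the Claim_ definition above) =====
theorem filter_short_runs_spec : Claim_equal_filter_short_runs := by
  unfold Claim_equal_filter_short_runs
  intro states ml _
  unfold Spec_filter_short_runs
  cases states with
  | nil =>
      rw [filter_short_runs, loopA, dif_neg (by simp)]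
      rfl
  | cons v t =>
      obtain ⟨hdec, hhd⟩ := leadCount_decomp v (v :: t)
      set n := leadCount v (v :: t) with hn_def
      set tl := (v :: t).drop n with htl_def
      have hn : 0 < n := by rw [hn_def]; simp [leadCount]
      rw [filter_short_runs, filter_short_runs_alt, hdec]
      -- inner loop from 0 finds the first run
      have hvk : ∀ k, k < n → ((List.replicate n v ++ tl) : List Int).getD k 0 = v := by
        intro k hk
        rw [getD_append_l _ _ k (by simpa using hk), getD_replicate v n k hk]
      have hfi : ((List.replicate n v ++ tl) : List Int).getD 0 0 = v := hvk 0 hn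
      have hend : n = (List.replicate n v ++ tl).length ∨
          ((List.replicate n v ++ tl) : List Int).getD n 0
            ≠ ((List.replicate n v ++ tl) : List Int).getD 0 0 := by
        by_cases htl2 : tl = []
        · left; rw [htl2]; simp
        · right
          obtain ⟨s, t', hst⟩ := List.exists_cons_of_ne_nil htl2
          have hs : s ≠ v := by rw [hst] at hhd; simpa using hhd
          have h1 : ((List.replicate n v ++ tl) : List Int).getD n 0 = s := by
            have h2 := getD_append_r (List.replicate n v) tl 0
            simp only [List.length_replicate, Nat.add_zero] at h2
            rw [h2, hst]; rfl
          rw [h1, hfi]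
          exact hs
      have hj : runEndA (List.replicate n v ++ tl) 0 0 = n := by
        have hnlen : n ≤ (List.replicate n v ++ tl).length := by simp
        exact runEndA_spec _ 0 n hnlen n 0 (by omega) (by omega)
          (fun k h1 h2 => by rw [hvk k h2, hfi]) hend
      have hi0 : 0 < (List.replicate n v ++ tl).length := by
        simp; omega
      rw [loopA, dif_pos hi0, hj, if_neg (by rintro ⟨_, h⟩; omega)]
      have hlast : (List.replicate n v).getLast? = some v := by
        obtain ⟨m, hm⟩ : ∃ m, n = m + 1 := ⟨n - 1, by omega⟩
        rw [hm]
        exact getLast?_replicate_succ v m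
      have hne : (List.replicate n v : List Int) ≠ [] := by
        simp; omega
      have hcall := loopA_emitR ml tl.length tl le_rfl (List.replicate n v) v hne hlast
      have hlenr : (List.replicate n v : List Int).length = n := by simp
      rw [hlenr] at hcall
      rw [hcall, runsOf_run v n hn tl hhd]
      show List.replicate n v ++ emitR ml v (runsOf tl)
          = (List.foldl (emitFold ml) (List.replicate n v, v) (runsOf tl)).1
      rw [emitFold_eq_emitR]
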